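-- pv_equiv track=rewrite | github.com/ldfdev/CodeForces-Div2-Problems | 1426D.py | solve
-- ===== SOURCE A (Python) =====
-- def solve(size, array):
--     should_be_changed = 0
--     # compute partial sums to detect if any subsegment sums to 0
--     partial_sums = [i for i in array]
--     sums = set([0, partial_sums[0]])
--     for i in range(1, size):
--         partial_sums[i] += partial_sums[i - 1]
--         if (partial_sums[i] in sums):
--             should_be_changed += 1
--             partial_sums[i] = array[i]
--             sums = set([0])
--         sums.add(partial_sums[i])
--
--     return should_be_changed
-- ===== SOURCE B (Python) =====
-- def solve(size, array):
--     # Stage 1: global prefix sums q[0..size], q[k] = sum of the first k elements.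
--     q = [0]
--     s = 0
--     for k in range(size):
--         s += array[k]
--         q.append(s)
--     # Stage 2: greedy cuts via a last-occurrence dict and a base pointer
--     # (no set is ever rebuilt; a repeat inside the current segment is exactly
--     #  "this prefix value last occurred at an index >= base").
--     last = {}
--     base = 0
--     ans = 0
--     for j in range(size + 1):
--         v = q[j]
--         if j >= 2 and v in last and last[v] >= base:
--             ans += 1
--             base = j - 1
--         last[v] = j
--     return ans
-- ===== Notes on version B (the rewrite author's own statement) =====
-- stated objective: alternative
-- what changed: Replaces A's single scan that maintains a running partial-sums copy of the array and rebuilds its seen-set on every collision with a two-stage algorithm: one pass builds the global prefix-sum list, then a second pass counts greedy cuts using a last-occurrence dictionary of prefix values and a base pointer, so no set is ever cleared and no array entry is rewritten.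
import Mathlib
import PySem

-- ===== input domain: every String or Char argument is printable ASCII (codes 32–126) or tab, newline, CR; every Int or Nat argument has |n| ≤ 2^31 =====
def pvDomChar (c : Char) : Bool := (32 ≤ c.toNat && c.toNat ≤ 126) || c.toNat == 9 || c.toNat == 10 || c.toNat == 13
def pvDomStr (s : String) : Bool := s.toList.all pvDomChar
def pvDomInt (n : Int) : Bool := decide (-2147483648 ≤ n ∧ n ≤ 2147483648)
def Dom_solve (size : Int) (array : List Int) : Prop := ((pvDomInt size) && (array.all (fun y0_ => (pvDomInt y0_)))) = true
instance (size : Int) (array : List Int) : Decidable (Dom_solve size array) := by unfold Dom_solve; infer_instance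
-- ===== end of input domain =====

-- B replaces A's running-sum-with-set-reset scan by a staged algorithm: one pass builds the
-- global prefix-sum list, a second pass counts greedy cuts with a last-occurrence dictionary
-- and a base pointer (no set is ever cleared); alternative decomposition, same asymptotic cost.

-- ===== PORT A =====
-- loop body of A's 'for i in range(1, size)'
def solveAstep (array : List Int) (st : Int × List Int × PySem.Set Int) (i : Int) :
    Int × List Int × PySem.Set Int :=
  let changed := st.1
  let ps := st.2.1
  let sums := st.2.2
  -- partial_sums[i] += partial_sums[i - 1]
  let ps := PySem.List.pySetD ps i (PySem.List.pyGetD ps i 0 + PySem.List.pyGetD ps (i - 1) 0)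
  if sums.contains (PySem.List.pyGetD ps i 0) then
    let ps := PySem.List.pySetD ps i (PySem.List.pyGetD array i 0)
    let sums : PySem.Set Int := PySem.Set.ofList [0]
    (changed + 1, ps, sums.add (PySem.List.pyGetD ps i 0))
  else
    (changed, ps, sums.add (PySem.List.pyGetD ps i 0))

def solve (size : Int) (array : List Int) : Int :=
  let partial_sums := array.map (fun i => i)
  let sums : PySem.Set Int := PySem.Set.ofList [0, PySem.List.pyGetD partial_sums 0 0]
  ((PySem.List.pyRange 1 size).foldl (solveAstep array) (0, partial_sums, sums)).1

-- ===== PORT B =====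
-- stage 1 of Source B: 'q = [0]; s = 0; for k in range(size): s += array[k]; q.append(s)'
def solveBprefix (size : Int) (array : List Int) : List Int × Int :=
  (PySem.List.pyRange 0 size).foldl
    (fun (st : List Int × Int) k =>
      let s := st.2 + PySem.List.pyGetD array k 0
      (st.1 ++ [s], s)) ([0], 0)

-- stage 2 loop body of Source B ('last[v] >= base' is only reached when 'v in last',
-- so the guarded 'last.getD v 0' is exact)
def solveBstep (q : List Int) (st : PySem.Dict Int Int × Int × Int) (j : Int) :
    PySem.Dict Int Int × Int × Int :=
  let v := PySem.List.pyGetD q j 0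
  let last := st.1
  let base := st.2.1
  let ans := st.2.2
  if 2 ≤ j ∧ last.contains v = true ∧ base ≤ last.getD v 0 then
    (last.insert v j, j - 1, ans + 1)
  else
    (last.insert v j, base, ans)

def solve_alt (size : Int) (array : List Int) : Int :=
  let q := (solveBprefix size array).1
  ((PySem.List.pyRange 0 (size + 1)).foldl (solveBstep q) (PySem.Dict.empty, 0, 0)).2.2

-- ===== PRECONDITION & SPEC =====
-- Pre_ excludes exactly the inputs on which A raises IndexError: an empty array
-- (A reads partial_sums[0] unconditionally) or size exceeding the array length.
def Pre_solve (size : Int) (array : List Int) : Prop :=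
  array ≠ [] ∧ size ≤ (array.length : Int)
instance (size : Int) (array : List Int) : Decidable (Pre_solve size array) := by
  unfold Pre_solve; infer_instance
def pvWitness_solve : Int × List Int := (3, [1, -1, 2])

def Spec_solve (size : Int) (array : List Int) (out : Int) : Prop := out = solve_alt size array
instance (size : Int) (array : List Int) (out : Int) : Decidable (Spec_solve size array out) := by
  unfold Spec_solve; infer_instance

-- ===== CLAIM (what is proved, stated in full; the proofs are below) =====
def Claim_equal_solve : Prop := ∀ (size : Int) (array : List Int), Dom_solve size array → Pre_solve size array → Spec_solve size array (solve size array)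

-- ===== LEMMAS AND PROOFS =====

-- Qp array k = the global prefix sum of the first k elements (0 for k ≤ 0).
def Qp (array : List Int) (k : Int) : Int := (array.take k.toNat).sum

-- The common mathematical skeleton both ports are reduced to: scan Q-indices j,
-- cut when the current prefix value already occurred at an index ≥ base.
def cuts (array : List Int) : Nat → Int → Int → Int → Int
  | 0, _, _, ans => ans
  | f + 1, j, base, ans =>
    if ∃ k ∈ PySem.List.pyRange base j, Qp array k = Qp array j then
      cuts array f (j + 1) (j - 1) (ans + 1)
    else cuts array f (j + 1) base ans

theorem pyGetD_pySetD_self (xs : List Int) (i : Int) (v : Int)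
    (h0 : 0 ≤ i) (hl : i < (xs.length : Int)) :
    PySem.List.pyGetD (PySem.List.pySetD xs i v) i 0 = v := by
  rw [PySem.List.pySetD_of_nonneg _ _ h0,
      PySem.List.pyGetD_eq_getElem _ _ h0 (by simpa using hl)]
  simp

theorem pyGetD_pySetD_ne (xs : List Int) (i k : Int) (v : Int)
    (h0 : 0 ≤ i) (hk : 0 ≤ k) (hne : k ≠ i) :
    PySem.List.pyGetD (PySem.List.pySetD xs i v) k 0 = PySem.List.pyGetD xs k 0 := by
  rw [PySem.List.pySetD_of_nonneg _ _ h0]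
  rw [show k = ((k.toNat : Nat) : Int) by omega]
  rw [PySem.List.pyGetD_natCast, PySem.List.pyGetD_natCast]
  have h : i.toNat ≠ k.toNat := by omega
  simp [List.getD, List.getElem?_set_ne h]

-- an in-range element is a difference of adjacent prefix sums
theorem getD_eq_Qp (array : List Int) (j : Int) (h0 : 0 ≤ j) (hl : j < (array.length : Int)) :
    PySem.List.pyGetD array j 0 = Qp array (j + 1) - Qp array j := by
  unfold Qp
  rw [PySem.List.pyGetD_eq_getElem _ _ h0 (by simpa using hl)]
  rw [show (j + 1).toNat = j.toNat + 1 by omega]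
  rw [List.take_add_one, List.sum_append]
  have : j.toNat < array.length := by omega
  simp [List.getElem?_eq_getElem this]

-- A single recursion at A's step granularity.
def runB (size : Int) (array : List Int) : Nat → Int → Int → PySem.Set Int → Int → Int
  | 0, _, _, _, count => count
  | n + 1, j, s, seen, count =>
    if j < size then
      let a := PySem.List.pyGetD array j 0
      if seen.contains (s + a) then
        runB size array n (j + 1) a (PySem.Set.ofList [0, a]) (count + 1)
      else
        runB size array n (j + 1) (s + a) (seen.add (s + a)) count
    else count

theorem A_eq_runB (size : Int) (array : List Int) (hlen : size ≤ (array.length : Int)) :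
    ∀ (n : Nat) (j : Int), n = (size - j).toNat → 1 ≤ j →
    ∀ (count s : Int) (seen : PySem.Set Int) (ps : List Int),
      ps.length = array.length →
      (∀ k : Int, j ≤ k → k < size → PySem.List.pyGetD ps k 0 = PySem.List.pyGetD array k 0) →
      PySem.List.pyGetD ps (j - 1) 0 = s →
      ((PySem.List.pyRange j size).foldl (solveAstep array) (count, ps, seen)).1
        = runB size array n j s seen count := by
  intro n
  induction n with
  | zero =>
    intro j hn hj count s seen ps hlenps hps hs
    rw [PySem.List.pyRange_one_eq_nil (by omega)]
    simp [runB]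
  | succ n ih =>
    intro j hn hj count s seen ps hlenps hps hs
    have hjs : j < size := by omega
    have hj0 : (0:Int) ≤ j := by omega
    have hjl : j < (ps.length : Int) := by rw [hlenps]; omega
    have hpsj : PySem.List.pyGetD ps j 0 = PySem.List.pyGetD array j 0 := hps j le_rfl hjs
    rw [PySem.List.pyRange_one_cons hjs, List.foldl_cons]
    have hstep : solveAstep array (count, ps, seen) j =
        (if seen.contains (s + PySem.List.pyGetD array j 0) then
          (count + 1,
            PySem.List.pySetD (PySem.List.pySetD ps j (s + PySem.List.pyGetD array j 0)) j
              (PySem.List.pyGetD array j 0),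
            PySem.Set.add (PySem.Set.ofList [0]) (PySem.List.pyGetD array j 0))
        else
          (count, PySem.List.pySetD ps j (s + PySem.List.pyGetD array j 0),
            PySem.Set.add seen (s + PySem.List.pyGetD array j 0))) := by
      unfold solveAstep
      simp only [hpsj, hs]
      rw [show PySem.List.pyGetD array j 0 + s = s + PySem.List.pyGetD array j 0 from by ring]
      rw [pyGetD_pySetD_self ps j _ hj0 hjl]
      by_cases hc : PySem.Set.contains seen (s + PySem.List.pyGetD array j 0)
      · simp only [if_pos hc]
        rw [pyGetD_pySetD_self _ j _ hj0 (by rw [PySem.List.length_pySetD]; exact hjl)]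
      · simp only [if_neg hc]
    rw [hstep, runB]
    simp only [if_pos hjs]
    by_cases hc : PySem.Set.contains seen (s + PySem.List.pyGetD array j 0)
    · simp only [if_pos hc]
      have hset : PySem.Set.add (PySem.Set.ofList [0]) (PySem.List.pyGetD array j 0)
          = PySem.Set.ofList [0, PySem.List.pyGetD array j 0] := rfl
      rw [hset]
      have hlen2 : (PySem.List.pySetD (PySem.List.pySetD ps j
          (s + PySem.List.pyGetD array j 0)) j (PySem.List.pyGetD array j 0)).length
          = array.length := by rw [PySem.List.length_pySetD, PySem.List.length_pySetD, hlenps]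
      have hps2 : ∀ k : Int, j + 1 ≤ k → k < size →
          PySem.List.pyGetD (PySem.List.pySetD (PySem.List.pySetD ps j
            (s + PySem.List.pyGetD array j 0)) j (PySem.List.pyGetD array j 0)) k 0
          = PySem.List.pyGetD array k 0 := by
        intro k hk1 hk2
        rw [pyGetD_pySetD_ne _ j k _ hj0 (by omega) (by omega),
            pyGetD_pySetD_ne _ j k _ hj0 (by omega) (by omega)]
        exact hps k (by omega) hk2
      have hs2 : PySem.List.pyGetD (PySem.List.pySetD (PySem.List.pySetD ps j
          (s + PySem.List.pyGetD array j 0)) j (PySem.List.pyGetD array j 0)) (j + 1 - 1) 0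
          = PySem.List.pyGetD array j 0 := by
        rw [show j + 1 - 1 = j from by ring]
        exact pyGetD_pySetD_self _ j _ hj0 (by rw [PySem.List.length_pySetD]; exact hjl)
      exact ih (j + 1) (by omega) (by omega) (count + 1) (PySem.List.pyGetD array j 0)
        (PySem.Set.ofList [0, PySem.List.pyGetD array j 0]) _ hlen2 hps2 hs2
    · simp only [if_neg hc]
      have hlen2 : (PySem.List.pySetD ps j (s + PySem.List.pyGetD array j 0)).length
          = array.length := by rw [PySem.List.length_pySetD, hlenps]
      have hps2 : ∀ k : Int, j + 1 ≤ k → k < size →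
          PySem.List.pyGetD (PySem.List.pySetD ps j (s + PySem.List.pyGetD array j 0)) k 0
          = PySem.List.pyGetD array k 0 := by
        intro k hk1 hk2
        rw [pyGetD_pySetD_ne _ j k _ hj0 (by omega) (by omega)]
        exact hps k (by omega) hk2
      have hs2 : PySem.List.pyGetD (PySem.List.pySetD ps j
          (s + PySem.List.pyGetD array j 0)) (j + 1 - 1) 0
          = s + PySem.List.pyGetD array j 0 := by
        rw [show j + 1 - 1 = j from by ring]
        exact pyGetD_pySetD_self ps j _ hj0 hjl
      exact ih (j + 1) (by omega) (by omega) count (s + PySem.List.pyGetD array j 0)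
        (PySem.Set.add seen (s + PySem.List.pyGetD array j 0)) _ hlen2 hps2 hs2

-- A's running state at array index j of segment base t is the set of shifted prefix values.
theorem runB_eq_cuts (size : Int) (array : List Int) (hlen : size ≤ (array.length : Int)) :
    ∀ (n : Nat) (j t : Int), n = (size - j).toNat → 0 ≤ t → t + 1 ≤ j →
    ∀ (count : Int) (seen : PySem.Set Int),
      (∀ x : Int, x ∈ seen ↔ ∃ k : Int, t ≤ k ∧ k ≤ j ∧ Qp array k - Qp array t = x) →
      runB size array n j (Qp array j - Qp array t) seen count
        = cuts array n (j + 1) t count := by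
  intro n
  induction n with
  | zero => intro j t hn ht htj count seen hseen; simp [runB, cuts]
  | succ n ih =>
    intro j t hn ht htj count seen hseen
    have hjs : j < size := by omega
    have hn' : n = (size - (j + 1)).toNat := by omega
    have hja : PySem.List.pyGetD array j 0 = Qp array (j + 1) - Qp array j :=
      getD_eq_Qp array j (by omega) (by omega)
    rw [runB]
    simp only [if_pos hjs, hja]
    have hsum : Qp array j - Qp array t + (Qp array (j + 1) - Qp array j)
        = Qp array (j + 1) - Qp array t := by ring
    rw [hsum]
    have hcond : PySem.Set.contains seen (Qp array (j + 1) - Qp array t) = true ↔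
        (∃ k ∈ PySem.List.pyRange t (j + 1), Qp array k = Qp array (j + 1)) := by
      rw [PySem.Set.contains_iff, hseen]
      constructor
      · rintro ⟨k, hk1, hk2, hk3⟩
        exact ⟨k, PySem.List.mem_pyRange_one.mpr ⟨hk1, by omega⟩, by linarith⟩
      · rintro ⟨k, hk, hk3⟩
        rw [PySem.List.mem_pyRange_one] at hk
        exact ⟨k, hk.1, by omega, by linarith⟩
    rw [show cuts array (n + 1) (j + 1) t count =
        (if ∃ k ∈ PySem.List.pyRange t (j + 1), Qp array k = Qp array (j + 1) then
          cuts array n (j + 1 + 1) (j + 1 - 1) (count + 1)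
        else cuts array n (j + 1 + 1) t count) from rfl]
    by_cases hc : ∃ k ∈ PySem.List.pyRange t (j + 1), Qp array k = Qp array (j + 1)
    · rw [if_pos hc, if_pos (hcond.mpr hc)]
      have hseen' : ∀ x : Int, x ∈ PySem.Set.ofList [0, Qp array (j + 1) - Qp array j] ↔
          ∃ k : Int, j ≤ k ∧ k ≤ j + 1 ∧ Qp array k - Qp array j = x := by
        intro x
        rw [PySem.Set.mem_ofList]
        constructor
        · intro hx
          rcases List.mem_pair.mp hx with h | h
          · exact ⟨j, le_rfl, by omega, by rw [h, sub_self]⟩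
          · exact ⟨j + 1, by omega, le_rfl, h.symm⟩
        · rintro ⟨k, hk1, hk2, rfl⟩
          rcases (by omega : k = j ∨ k = j + 1) with rfl | rfl
          · simp
          · simp
      rw [show j + 1 - 1 = j from by ring]
      exact ih (j + 1) j hn' (by omega) (by omega) (count + 1)
        (PySem.Set.ofList [0, Qp array (j + 1) - Qp array j]) hseen'
    · rw [if_neg hc, if_neg (by rw [hcond]; exact hc)]
      have hseen' : ∀ x : Int, x ∈ PySem.Set.add seen (Qp array (j + 1) - Qp array t) ↔
          ∃ k : Int, t ≤ k ∧ k ≤ j + 1 ∧ Qp array k - Qp array t = x := by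
        intro x
        rw [PySem.Set.mem_add, hseen]
        constructor
        · rintro (⟨k, hk1, hk2, hk3⟩ | rfl)
          · exact ⟨k, hk1, by omega, hk3⟩
          · exact ⟨j + 1, by omega, le_rfl, rfl⟩
        · rintro ⟨k, hk1, hk2, hk3⟩
          rcases (by omega : k ≤ j ∨ k = j + 1) with h | rfl
          · exact Or.inl ⟨k, hk1, h, hk3⟩
          · exact Or.inr hk3.symm
      exact ih (j + 1) t hn' ht (by omega) count _ hseen'

-- stage-1 invariant: the prefix list built by Source B is exactly the Qp values
theorem Bprefix_eq (size : Int) (array : List Int) (hlen : size ≤ (array.length : Int)) :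
    ∀ (n : Nat) (m : Int), n = (size - m).toNat → 0 ≤ m → m ≤ size →
    ((PySem.List.pyRange m size).foldl
      (fun (st : List Int × Int) k =>
        let s := st.2 + PySem.List.pyGetD array k 0
        (st.1 ++ [s], s))
      ((PySem.List.pyRange 0 (m + 1)).map (Qp array), Qp array m))
    = ((PySem.List.pyRange 0 (size + 1)).map (Qp array), Qp array (max m size)) := by
  intro n
  induction n with
  | zero =>
    intro m hn hm hms
    have hm' : m = size := by omega
    subst hm'
    rw [PySem.List.pyRange_one_eq_nil le_rfl]
    have : max m m = m := by omega
    rw [this]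
    rfl
  | succ n ih =>
    intro m hn hm _
    have hms : m < size := by omega
    rw [PySem.List.pyRange_one_cons hms, List.foldl_cons]
    have ha : PySem.List.pyGetD array m 0 = Qp array (m + 1) - Qp array m :=
      getD_eq_Qp array m hm (by omega)
    have hmap : (PySem.List.pyRange 0 (m + 1)).map (Qp array) ++ [Qp array (m + 1)]
        = (PySem.List.pyRange 0 (m + 1 + 1)).map (Qp array) := by
      rw [PySem.List.pyRange_one_succ_right (by omega : (0:Int) ≤ m + 1), List.map_append]
      rfl
    have := ih (m + 1) (by omega) (by omega) (by omega)
    simp only [ha] at *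
    rw [show Qp array m + (Qp array (m + 1) - Qp array m) = Qp array (m + 1) from by ring]
    rw [hmap]
    rw [this]
    have : max (m + 1) size = max m size := by omega
    rw [this]

-- reading q[j] back out of the mapped range
theorem getD_map_range_Qp (array : List Int) (size j : Int) (h0 : 0 ≤ j) (hj : j ≤ size) :
    PySem.List.pyGetD ((PySem.List.pyRange 0 (size + 1)).map (Qp array)) j 0 = Qp array j := by
  rw [PySem.List.pyGetD_eq_getElem _ _ h0 (by
    rw [List.length_map, PySem.List.length_pyRange_one]; omega)]
  rw [List.getElem_map]
  congr 1
  rw [PySem.List.getElem_pyRange_one]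
  omega

-- the dict invariant: last.get? v is the last index < j at which Qp takes the value v
def LastInv (array : List Int) (last : PySem.Dict Int Int) (j : Int) : Prop :=
  (∀ v m : Int, last.get? v = some m ↔
    (0 ≤ m ∧ m < j ∧ Qp array m = v ∧ ∀ k : Int, m < k → k < j → Qp array k ≠ v)) ∧
  (∀ v : Int, last.contains v = true ↔ ∃ k : Int, 0 ≤ k ∧ k < j ∧ Qp array k = v)

theorem LastInv_insert (array : List Int) (last : PySem.Dict Int Int) (j : Int)
    (h0 : 0 ≤ j) (h : LastInv array last j) :
    LastInv array (last.insert (Qp array j) j) (j + 1) := by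
  obtain ⟨h1, h2⟩ := h
  constructor
  · intro v m
    rw [PySem.Dict.get?_insert]
    by_cases hv : v = Qp array j
    · subst hv
      rw [if_pos rfl]
      constructor
      · rintro h'
        have hm : m = j := (Option.some.inj h').symm
        subst hm
        exact ⟨h0, by omega, rfl, by intro k hk1 hk2 _; omega⟩
      · rintro ⟨hm0, hmj, hq, hmax⟩
        by_cases hmj' : m = j
        · subst hmj'; rfl
        · exfalso; exact hmax j (by omega) (by omega) rfl
    · rw [if_neg hv, h1]
      constructor
      · rintro ⟨hm0, hmj, hq, hmax⟩
        refine ⟨hm0, by omega, hq, ?_⟩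
        intro k hk1 hk2 hk3
        by_cases hkj : k = j
        · subst hkj; exact hv hk3.symm
        · exact hmax k hk1 (by omega) hk3
      · rintro ⟨hm0, hmj, hq, hmax⟩
        have hmj2 : m < j := by
          rcases (by omega : m < j ∨ m = j) with h' | h'
          · exact h'
          · subst h'; exact absurd hq.symm hv
        exact ⟨hm0, hmj2, hq, fun k hk1 hk2 hk3 => hmax k hk1 (by omega) hk3⟩
  · intro v
    rw [PySem.Dict.contains_insert, Bool.or_eq_true, beq_iff_eq, h2]
    constructor
    · rintro (rfl | ⟨k, hk1, hk2, hk3⟩)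
      · exact ⟨j, h0, by omega, rfl⟩
      · exact ⟨k, hk1, by omega, hk3⟩
    · rintro ⟨k, hk1, hk2, hk3⟩
      rcases (by omega : k < j ∨ k = j) with h' | rfl
      · exact Or.inr ⟨k, hk1, h', hk3⟩
      · exact Or.inl hk3.symm

-- the check Source B performs is exactly "Qp j occurred at an index in [base, j)"
theorem LastInv_check (array : List Int) (last : PySem.Dict Int Int) (j base : Int)
    (hb : 0 ≤ base) (h : LastInv array last j) (v : Int) :
    (last.contains v = true ∧ base ≤ last.getD v 0) ↔
      ∃ k ∈ PySem.List.pyRange base j, Qp array k = v := by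
  obtain ⟨h1, h2⟩ := h
  constructor
  · rintro ⟨hc, hgd⟩
    have hsome : (last.get? v).isSome := by rw [← PySem.Dict.contains_eq_isSome_get?]; exact hc
    obtain ⟨m, hm⟩ := Option.isSome_iff_exists.mp hsome
    obtain ⟨hm0, hmj, hq, _⟩ := (h1 v m).mp hm
    rw [PySem.Dict.getD_eq_get?_getD, hm] at hgd
    exact ⟨m, PySem.List.mem_pyRange_one.mpr ⟨hgd, by omega⟩, hq⟩
  · rintro ⟨k, hk, hq⟩
    rw [PySem.List.mem_pyRange_one] at hk
    have hc : last.contains v = true := (h2 v).mpr ⟨k, by omega, by omega, hq⟩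
    have hsome : (last.get? v).isSome := by rw [← PySem.Dict.contains_eq_isSome_get?]; exact hc
    obtain ⟨m, hm⟩ := Option.isSome_iff_exists.mp hsome
    obtain ⟨hm0, hmj, hq', hmax⟩ := (h1 v m).mp hm
    refine ⟨hc, ?_⟩
    rw [PySem.Dict.getD_eq_get?_getD, hm]
    simp only [Option.getD_some]
    by_contra hlt
    exact hmax k (by omega) (by omega) hq
    
-- stage-2 main loop equals the cut recursion
theorem Bmain_eq_cuts (size : Int) (array : List Int) (q : List Int)
    (hq : ∀ j : Int, 0 ≤ j → j ≤ size → PySem.List.pyGetD q j 0 = Qp array j) :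
    ∀ (n : Nat) (j : Int), n = (size + 1 - j).toNat → 2 ≤ j →
    ∀ (last : PySem.Dict Int Int) (base ans : Int), 0 ≤ base → base ≤ j - 1 →
      LastInv array last j →
      ((PySem.List.pyRange j (size + 1)).foldl (solveBstep q) (last, base, ans)).2.2
        = cuts array n j base ans := by
  intro n
  induction n with
  | zero =>
    intro j hn hj last base ans hb hbj hinv
    rw [PySem.List.pyRange_one_eq_nil (by omega)]
    simp [cuts]
  | succ n ih =>
    intro j hn hj last base ans hb hbj hinv
    have hjs : j < size + 1 := by omega
    rw [PySem.List.pyRange_one_cons hjs, List.foldl_cons]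
    have hv : PySem.List.pyGetD q j 0 = Qp array j := hq j (by omega) (by omega)
    rw [show cuts array (n + 1) j base ans =
        (if ∃ k ∈ PySem.List.pyRange base j, Qp array k = Qp array j then
          cuts array n (j + 1) (j - 1) (ans + 1)
        else cuts array n (j + 1) base ans) from rfl]
    have hn' : n = (size + 1 - (j + 1)).toNat := by omega
    have hj1 : 2 ≤ j + 1 := by omega
    have hj0 : 0 ≤ j := by omega
    have hb1 : 0 ≤ j - 1 := by omega
    have hbj1 : j - 1 ≤ j + 1 - 1 := by omega
    have hbj2 : base ≤ j + 1 - 1 := by omega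
    have hcheck := LastInv_check array last j base hb hinv (Qp array j)
    by_cases hc : ∃ k ∈ PySem.List.pyRange base j, Qp array k = Qp array j
    · rw [if_pos hc]
      have hcond2 : 2 ≤ j ∧ last.contains (Qp array j) = true ∧
          base ≤ last.getD (Qp array j) 0 :=
        ⟨by omega, (hcheck.mpr hc).1, (hcheck.mpr hc).2⟩
      have hstep : solveBstep q (last, base, ans) j =
          (last.insert (Qp array j) j, j - 1, ans + 1) := by
        simp only [solveBstep, hv]
        rw [if_pos hcond2]
      rw [hstep]
      exact ih (j + 1) hn' hj1 _ (j - 1) (ans + 1) hb1 hbj1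
        (LastInv_insert array last j hj0 hinv)
    · rw [if_neg hc]
      have hcond2 : ¬ (2 ≤ j ∧ last.contains (Qp array j) = true ∧
          base ≤ last.getD (Qp array j) 0) := by
        rintro ⟨_, hc1, hc2⟩
        exact hc (hcheck.mp ⟨hc1, hc2⟩)
      have hstep : solveBstep q (last, base, ans) j =
          (last.insert (Qp array j) j, base, ans) := by
        simp only [solveBstep, hv]
        rw [if_neg hcond2]
      rw [hstep]
      exact ih (j + 1) hn' hj1 _ base ans hb hbj2
        (LastInv_insert array last j hj0 hinv)

-- the initial dict {Qp 0 ↦ 0, Qp 1 ↦ 1} satisfies the invariant at j = 2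
theorem LastInv_init (array : List Int) :
    LastInv array ((PySem.Dict.empty.insert (Qp array 0) 0).insert (Qp array 1) 1) 2 := by
  have h0 : LastInv array (PySem.Dict.empty : PySem.Dict Int Int) 0 := by
    constructor
    · intro v m; rw [PySem.Dict.get?_empty]; constructor
      · intro h; cases h
      · rintro ⟨_, h, _, _⟩; omega
    · intro v; rw [PySem.Dict.contains_empty]; constructor
      · intro h; cases h
      · rintro ⟨k, hk1, hk2, _⟩; omega
  have h1 := LastInv_insert array _ 0 le_rfl h0
  have h2 := LastInv_insert array _ 1 (by omega) h1
  exact h2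

-- ===== VERDICT (by name: the statement is the Claim_ definition above) =====
theorem solve_spec : Claim_equal_solve := by
  intro size array _ hpre
  unfold Spec_solve solve solve_alt
  obtain ⟨hne, hlen⟩ := hpre
  have hlen0 : 0 < (array.length : Int) := by
    cases array with
    | nil => exact absurd rfl hne
    | cons a t => simp
  have hmap : array.map (fun i => i) = array := by simp
  show (List.foldl (solveAstep array)
      (0, array.map (fun i => i),
        PySem.Set.ofList [0, PySem.List.pyGetD (array.map (fun i => i)) 0 0])
      (PySem.List.pyRange 1 size)).1
    = (List.foldl (solveBstep (solveBprefix size array).1) (PySem.Dict.empty, 0, 0)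
      (PySem.List.pyRange 0 (size + 1))).2.2
  rw [hmap]
  by_cases h2 : 2 ≤ size
  · -- both sides reduce to 'cuts' from j = 2
    have hq0 : (solveBprefix size array).1 = (PySem.List.pyRange 0 (size + 1)).map (Qp array) := by
      unfold solveBprefix
      have := Bprefix_eq size array hlen (size.toNat) 0 (by omega) le_rfl (by omega)
      have hinit : (PySem.List.pyRange 0 (0 + 1)).map (Qp array) = [0] := rfl
      rw [hinit] at this
      rw [show (Qp array 0) = 0 from rfl] at this
      rw [this]
    have hq : ∀ j : Int, 0 ≤ j → j ≤ size →
        PySem.List.pyGetD (solveBprefix size array).1 j 0 = Qp array j := by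
      intro j hj0 hjs
      rw [hq0]
      exact getD_map_range_Qp array size j hj0 hjs
    -- B side: peel j = 0 and j = 1
    have hrange : PySem.List.pyRange 0 (size + 1)
        = 0 :: 1 :: PySem.List.pyRange 2 (size + 1) := by
      rw [PySem.List.pyRange_one_cons (by omega : (0:Int) < size + 1)]
      rw [PySem.List.pyRange_one_cons (by omega : (0:Int) + 1 < size + 1)]
      norm_num
    have hstep0 : solveBstep (solveBprefix size array).1 (PySem.Dict.empty, 0, 0) 0
        = (PySem.Dict.empty.insert (Qp array 0) 0, 0, 0) := by
      simp only [solveBstep, hq 0 le_rfl (by omega)]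
      rw [if_neg (by rintro ⟨h, _⟩; omega)]
    have hstep1 : solveBstep (solveBprefix size array).1
        (PySem.Dict.empty.insert (Qp array 0) 0, 0, 0) 1
        = ((PySem.Dict.empty.insert (Qp array 0) 0).insert (Qp array 1) 1, 0, 0) := by
      simp only [solveBstep, hq 1 (by omega) (by omega)]
      rw [if_neg (by rintro ⟨h, _⟩; omega)]
    rw [hrange, List.foldl_cons, hstep0, List.foldl_cons, hstep1]
    have hB := Bmain_eq_cuts size array (solveBprefix size array).1 hq
      ((size + 1 - 2).toNat) 2 rfl le_rfl
      ((PySem.Dict.empty.insert (Qp array 0) 0).insert (Qp array 1) 1) 0 0 le_rfl (by omega)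
      (LastInv_init array)
    rw [hB]
    -- A side
    have hseen0 : ∀ x : Int, x ∈ PySem.Set.ofList [0, PySem.List.pyGetD array 0 0] ↔
        ∃ k : Int, 0 ≤ k ∧ k ≤ 1 ∧ Qp array k - Qp array 0 = x := by
      intro x
      have ha0 : PySem.List.pyGetD array 0 0 = Qp array 1 - Qp array 0 :=
        getD_eq_Qp array 0 le_rfl (by omega)
      rw [PySem.Set.mem_ofList, ha0]
      constructor
      · intro hx
        rcases List.mem_pair.mp hx with h | h
        · exact ⟨0, le_rfl, by omega, by rw [h]; simp [Qp]⟩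
        · exact ⟨1, by omega, le_rfl, h.symm⟩
      · rintro ⟨k, hk1, hk2, rfl⟩
        rcases (by omega : k = 0 ∨ k = 1) with rfl | rfl
        · simp [Qp]
        · simp
    have hA1 := A_eq_runB size array hlen (size - 1).toNat 1 (by omega) le_rfl 0
      (PySem.List.pyGetD array 0 0)
      (PySem.Set.ofList [0, PySem.List.pyGetD array 0 0]) array rfl
      (fun k _ _ => rfl) (by norm_num)
    rw [hA1]
    have ha0 : PySem.List.pyGetD array 0 0 = Qp array 1 - Qp array 0 :=
      getD_eq_Qp array 0 le_rfl (by omega)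
    rw [ha0]
    have hA2 := runB_eq_cuts size array hlen (size - 1).toNat 1 0 (by omega) le_rfl
      (by omega) 0 (PySem.Set.ofList [0, Qp array 1 - Qp array 0]) (by
        intro x
        rw [← ha0]
        exact hseen0 x)
    rw [hA2]
    have : (size - 1).toNat = (size + 1 - 2).toNat := by omega
    rw [this]
    norm_num
  · -- size ≤ 1: A returns 0, and B performs no checked step
    rw [PySem.List.pyRange_one_eq_nil (by omega : size ≤ 1)]
    simp only [List.foldl_nil]
    rcases (by omega : size + 1 ≤ 0 ∨ size = 0 ∨ size = 1) with h | h | h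
    · rw [PySem.List.pyRange_one_eq_nil (by omega : size + 1 ≤ 0)]
      rfl
    · subst h
      rw [show PySem.List.pyRange (0:Int) (0 + 1) = [0] from rfl]
      rw [List.foldl_cons]
      simp only [solveBstep]
      rw [if_neg (by rintro ⟨hh, _⟩; omega)]
      rfl
    · subst h
      rw [show PySem.List.pyRange (0:Int) (1 + 1) = [0, 1] from rfl]
      rw [List.foldl_cons, List.foldl_cons]
      simp only [solveBstep]
      rw [if_neg (by rintro ⟨hh, _⟩; omega),
          if_neg (by rintro ⟨hh, _⟩; omega)]
      rfl
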